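-- pv_equiv track=rewrite | github.com/Aashishbirhade/interview-preparation-challenges | ploting/pattern/median_subsequence_amazon.py | medians
-- ===== SOURCE A (Python) =====
-- def medians(values, k):
--     n = len(values)
--     medians_list = []
--
--     def generate(start, path):
--         if len(path) == k:
--             sorted_subseq = sorted(path)
--             median_val = sorted_subseq[(k - 1) // 2]
--             medians_list.append(median_val)
--             return
--
--
--         for i in range(start, n):
--             generate(i + 1, path + [values[i]])
--
--
--     generate(0, [])
--
--     return [max(medians_list), min(medians_list)]
-- ===== SOURCE B (Python) =====
-- def medians(values, k):
--     s = sorted(values)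
--     m = (k - 1) // 2
--     return [s[len(values) - k + m], s[m]]
-- ===== Notes on version B (the rewrite author's own statement) =====
-- stated objective: faster
-- what changed: Replaces the exponential enumeration of all C(n,k) subsequences (sorting each one) by a single sort of the input and two direct index reads: max median = sorted[n-k+m], min median = sorted[m] with m=(k-1)//2.
import Mathlib
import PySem

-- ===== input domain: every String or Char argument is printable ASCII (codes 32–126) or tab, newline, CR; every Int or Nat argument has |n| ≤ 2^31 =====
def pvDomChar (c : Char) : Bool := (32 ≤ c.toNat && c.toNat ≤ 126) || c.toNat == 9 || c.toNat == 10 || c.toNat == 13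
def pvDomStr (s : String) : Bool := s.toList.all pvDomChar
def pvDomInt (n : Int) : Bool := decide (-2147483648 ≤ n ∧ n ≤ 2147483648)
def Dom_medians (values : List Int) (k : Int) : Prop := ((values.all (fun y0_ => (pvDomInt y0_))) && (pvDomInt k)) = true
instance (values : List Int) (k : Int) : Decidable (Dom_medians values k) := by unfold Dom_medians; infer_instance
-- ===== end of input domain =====

-- B replaces A's exhaustive enumeration of all k-subsequences by one sort of the input and two index reads.

-- ===== PORT A =====
-- median of one subsequence: sorted(path)[(k-1)//2]; the default 0 of pyGetD is only
-- reachable outside Pre_ (Python raises IndexError there)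
def pvMed (k : Int) (path : List Int) : Int :=
  PySem.List.pyGetD (PySem.List.sorted path (fun y => y) false) (PySem.Int.floordiv (k - 1) 2) 0

-- generate(start, path): the loop 'for i in range(start, n)' recursing over the suffix
-- values[start:]; the appends to medians_list become concatenation of the collected medians
def pvGen (k : Int) (xs : List Int) (path : List Int) : List Int :=
  if (path.length : Int) = k then [pvMed k path]
  else
    match xs with
    | [] => []
    | x :: rest => pvGen k rest (path ++ [x]) ++ pvGen k rest path

-- Python's max(l)/min(l) raise ValueError on l = []; the .getD 0 is only reachable outside Pre_
def medians (values : List Int) (k : Int) : List Int :=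
  let l := pvGen k values []
  [(PySem.List.max? l (fun y => y)).getD 0, (PySem.List.min? l (fun y => y)).getD 0]

-- ===== PORT B =====
-- Source B: s = sorted(values); m = (k-1)//2; return [s[len(values)-k+m], s[m]]
-- (pyGetD's default 0 is only reachable outside Pre_, where Python B raises IndexError)
def medians_alt (values : List Int) (k : Int) : List Int :=
  let s := PySem.List.sorted values (fun y => y) false
  let m := PySem.Int.floordiv (k - 1) 2
  [PySem.List.pyGetD s ((values.length : Int) - k + m) 0, PySem.List.pyGetD s m 0]

-- ===== PRECONDITION & SPEC =====
-- Pre_ excludes exactly the inputs where Python A raises: for k ≤ 0 it hits sorted(path)[(k-1)//2]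
-- with an out-of-range index (IndexError) or max([]) (ValueError), and for k > len(values)
-- no k-subsequence exists, so max([]) raises ValueError
def Pre_medians (values : List Int) (k : Int) : Prop := 1 ≤ k ∧ k ≤ (values.length : Int)
instance (values : List Int) (k : Int) : Decidable (Pre_medians values k) := by unfold Pre_medians; infer_instance
def pvWitness_medians : List Int × Int := ([3, 1, 2], 2)

def Spec_medians (values : List Int) (k : Int) (out : List Int) : Prop := out = medians_alt values k
instance (values : List Int) (k : Int) (out : List Int) : Decidable (Spec_medians values k out) := by unfold Spec_medians; infer_instance

-- ===== CLAIM (what is proved, stated in full; the proofs are below) =====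
def Claim_equal_medians : Prop := ∀ (values : List Int) (k : Int), Dom_medians values k → Pre_medians values k → Spec_medians values k (medians values k)

-- ===== LEMMAS AND PROOFS =====

-- every collected value is the median of one k-element subsequence (sublist), and conversely
theorem pvGen_mem (k : Int) (x : Int) :
    ∀ (xs path : List Int), x ∈ pvGen k xs path ↔
      ∃ c : List Int, c.Sublist xs ∧ ((path.length : Int) + c.length = k) ∧ x = pvMed k (path ++ c) := by
  intro xs
  induction xs with
  | nil =>
    intro path
    by_cases h : (path.length : Int) = k
    · simp only [pvGen, h]
      constructor
      · intro hx
        refine ⟨[], List.Sublist.refl _, by simpa using h, ?_⟩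
        simpa using hx
      · rintro ⟨c, hc, _, hx⟩
        have : c = [] := List.sublist_nil.mp hc
        subst this
        simpa using hx
    · simp only [pvGen, if_neg h]
      constructor
      · intro hx; simp at hx
      · rintro ⟨c, hc, hlen, _⟩
        have : c = [] := List.sublist_nil.mp hc
        subst this
        simp at hlen
        exact absurd hlen h
  | cons a rest ih =>
    intro path
    by_cases h : (path.length : Int) = k
    · simp only [pvGen, if_pos h]
      constructor
      · intro hx
        refine ⟨[], List.nil_sublist _, by simpa using h, ?_⟩
        simpa using hx
      · rintro ⟨c, hc, hlen, hx⟩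
        have : c = [] := by
          have : (c.length : Int) = 0 := by omega
          simpa [List.length_eq_zero_iff] using this
        subst this
        simpa using hx
    · simp only [pvGen, if_neg h, List.mem_append]
      rw [ih (path ++ [a]), ih path]
      constructor
      · rintro (⟨c, hc, hlen, hx⟩ | ⟨c, hc, hlen, hx⟩)
        · refine ⟨a :: c, List.Sublist.cons₂ a hc, ?_, ?_⟩
          · simp at hlen ⊢; omega
          · simpa [List.append_assoc] using hx
        · exact ⟨c, hc.cons a, hlen, hx⟩
      · rintro ⟨c, hc, hlen, hx⟩
        rcases List.sublist_cons_iff.mp hc with hcr | ⟨r, rfl, hr⟩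
        · exact Or.inr ⟨c, hcr, hlen, hx⟩
        · refine Or.inl ⟨r, hr, ?_, ?_⟩
          · simp at hlen ⊢; omega
          · simpa [List.append_assoc] using hx

-- index bounds for the elements of a sublist of a (≤-)sorted list
theorem sublist_getElem_bounds {s v : List Int} (h : s.Sublist v) (hv : v.Pairwise (· ≤ ·)) :
    ∀ i (hi : i < s.length),
      v[i]'(Nat.lt_of_lt_of_le hi h.length_le) ≤ s[i] ∧
      s[i] ≤ v[v.length - s.length + i]'(by have := h.length_le; omega) := by
  induction h with
  | slnil => intro i hi; simp at hi
  | @cons l₁ l₂ a h ih =>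
    intro i hi
    have hvp : l₂.Pairwise (· ≤ ·) := (List.pairwise_cons.mp hv).2
    have hle := h.length_le
    have hi2 : i < l₂.length := Nat.lt_of_lt_of_le hi hle
    have h1 : (a :: l₂)[i]'(by simp only [List.length_cons]; omega) ≤ (a :: l₂)[i+1]'(by simp only [List.length_cons]; omega) := by
      exact List.pairwise_iff_getElem.mp hv i (i+1) (by simp only [List.length_cons]; omega) (by simp only [List.length_cons]; omega) (by omega)
    constructor
    · calc (a :: l₂)[i]'(by simp only [List.length_cons]; omega) ≤ (a :: l₂)[i+1]'(by simp only [List.length_cons]; omega) := h1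
        _ = l₂[i] := List.getElem_cons_succ ..
        _ ≤ l₁[i] := (ih hvp i hi).1
    · have he : (a :: l₂).length - l₁.length + i = (l₂.length - l₁.length + i) + 1 := by
        simp; omega
      calc l₁[i] ≤ l₂[l₂.length - l₁.length + i]'(by omega) := (ih hvp i hi).2
        _ = (a :: l₂)[(l₂.length - l₁.length + i) + 1]'(by simp only [List.length_cons]; omega) := (List.getElem_cons_succ ..).symm
        _ = (a :: l₂)[(a :: l₂).length - l₁.length + i]'(by simp only [List.length_cons]; omega) := by
            congr 1; omega
  | @cons₂ l₁ l₂ a h ih =>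
    intro i hi
    have hvp : l₂.Pairwise (· ≤ ·) := (List.pairwise_cons.mp hv).2
    have hle := h.length_le
    match i with
    | 0 =>
      refine ⟨le_rfl, ?_⟩
      have hd : (a :: l₂).length - (a :: l₁).length + 0 = l₂.length - l₁.length := by simp
      rcases Nat.eq_zero_or_pos (l₂.length - l₁.length) with h0 | hpos
      · simp only [List.getElem_cons_zero]
        have h00 : (a :: l₂).length - (a :: l₁).length + 0 = 0 := by simp only [List.length_cons]; omega
        simp only [h00, List.getElem_cons_zero]
        exact le_refl a
      · simp only [List.getElem_cons_zero]
        calc a = (a :: l₂)[0] := rfl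
          _ ≤ (a :: l₂)[(a :: l₂).length - (a :: l₁).length + 0]'(by simp only [List.length_cons]; omega) := by
            exact List.pairwise_iff_getElem.mp hv 0 _ (by simp) (by simp only [List.length_cons]; omega) (by simp only [List.length_cons]; omega)
    | j + 1 =>
      have hj : j < l₁.length := by simpa using hi
      refine ⟨?_, ?_⟩
      · calc (a :: l₂)[j+1]'(by simp only [List.length_cons]; omega) = l₂[j]'(by omega) := List.getElem_cons_succ ..
          _ ≤ l₁[j] := (ih hvp j hj).1
          _ = (a :: l₁)[j+1]'(by simp only [List.length_cons]; omega) := (List.getElem_cons_succ ..).symm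
      · calc (a :: l₁)[j+1]'(by simp only [List.length_cons]; omega) = l₁[j] := List.getElem_cons_succ ..
          _ ≤ l₂[l₂.length - l₁.length + j]'(by omega) := (ih hvp j hj).2
          _ = (a :: l₂)[(l₂.length - l₁.length + j) + 1]'(by simp only [List.length_cons]; omega) := (List.getElem_cons_succ ..).symm
          _ = (a :: l₂)[(a :: l₂).length - (a :: l₁).length + (j+1)]'(by simp only [List.length_cons]; omega) := by congr 1; simp only [List.length_cons]; omega

theorem sorted_sublist_sorted (c values : List Int) (hc : c.Sublist values) :
    (PySem.List.sorted c (fun y => y) false).Sublist (PySem.List.sorted values (fun y => y) false) := by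
  apply List.sublist_of_subperm_of_pairwise (r := (· ≤ ·))
  · have h1 : List.Subperm (PySem.List.sorted c (fun y => y) false) values :=
      ⟨c, (PySem.List.sorted_perm c (fun y => y) false).symm, hc⟩
    exact h1.trans (PySem.List.sorted_perm values (fun y => y) false).symm.subperm
  · simpa using PySem.List.sorted_pairwise c (fun y => y)
  · simpa using PySem.List.sorted_pairwise values (fun y => y)

theorem pvMed_eq_getElem (k : Int) (c : List Int) (kN : Nat) (hk : k = (kN : Nat)) (h1 : 1 ≤ kN)
    (hlen : c.length = kN) :
    pvMed k c = (PySem.List.sorted c (fun y => y) false)[(kN - 1) / 2]'(by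
      rw [PySem.List.length_sorted]; omega) := by
  unfold pvMed
  have hfd : PySem.Int.floordiv (k - 1) 2 = (((kN - 1) / 2 : Nat) : Int) := by
    rw [hk, show ((kN : Int) - 1) = ((kN - 1 : Nat) : Int) from by omega]
    exact_mod_cast PySem.Int.floordiv_natCast (kN - 1) 2
  rw [hfd, PySem.List.pyGetD_natCast]
  exact List.getD_eq_getElem _ _ (by rw [PySem.List.length_sorted]; omega)

-- median of a k-element sub-multiset realised as v.take / v.drop
theorem pvMed_of_perm_take (values : List Int) (k : Int) (kN : Nat) (hk : k = (kN : Nat)) (h1 : 1 ≤ kN)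
    (h2 : kN ≤ values.length) (c : List Int)
    (hcp : c.Perm ((PySem.List.sorted values (fun y => y) false).take kN)) :
    pvMed k c = (PySem.List.sorted values (fun y => y) false)[(kN - 1) / 2]'(by
      rw [PySem.List.length_sorted]; omega) := by
  have hvp : (PySem.List.sorted values (fun y => y) false).Pairwise (· ≤ ·) := by
    simpa using PySem.List.sorted_pairwise values (fun y => y)
  have hclen : c.length = kN := by
    rw [hcp.length_eq, List.length_take, PySem.List.length_sorted]; omega
  rw [pvMed_eq_getElem k c kN hk h1 hclen]
  have hsc : PySem.List.sorted c (fun y => y) false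
      = (PySem.List.sorted values (fun y => y) false).take kN := by
    rw [PySem.List.sorted_eq_sorted_of_perm c _ (fun y => y) (fun a b h => h) hcp]
    apply PySem.List.sorted_eq_self_of_pairwise
    exact (hvp.sublist (List.take_sublist _ _))
  rw [List.getElem_of_eq hsc]
  exact List.getElem_take

theorem pvMed_of_perm_drop (values : List Int) (k : Int) (kN : Nat) (hk : k = (kN : Nat)) (h1 : 1 ≤ kN)
    (h2 : kN ≤ values.length) (c : List Int)
    (hcp : c.Perm ((PySem.List.sorted values (fun y => y) false).drop (values.length - kN))) :
    pvMed k c = (PySem.List.sorted values (fun y => y) false)[values.length - kN + (kN - 1) / 2]'(by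
      rw [PySem.List.length_sorted]; omega) := by
  have hvp : (PySem.List.sorted values (fun y => y) false).Pairwise (· ≤ ·) := by
    simpa using PySem.List.sorted_pairwise values (fun y => y)
  have hclen : c.length = kN := by
    rw [hcp.length_eq, List.length_drop, PySem.List.length_sorted]; omega
  rw [pvMed_eq_getElem k c kN hk h1 hclen]
  have hsc : PySem.List.sorted c (fun y => y) false
      = (PySem.List.sorted values (fun y => y) false).drop (values.length - kN) := by
    rw [PySem.List.sorted_eq_sorted_of_perm c _ (fun y => y) (fun a b h => h) hcp]
    apply PySem.List.sorted_eq_self_of_pairwise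
    exact (hvp.sublist (List.drop_sublist _ _))
  rw [List.getElem_of_eq hsc]
  rw [List.getElem_drop]

theorem medians_eq (values : List Int) (k : Int) (kN : Nat) (hk : k = (kN : Int)) (h1 : 1 ≤ kN)
    (h2 : kN ≤ values.length) : medians values k = medians_alt values k := by
  set v := PySem.List.sorted values (fun y => y) false with hv
  have hvp : v.Pairwise (· ≤ ·) := by simpa using PySem.List.sorted_pairwise values (fun y => y)
  have hvlen : v.length = values.length := PySem.List.length_sorted values (fun y => y) false
  have hiu : values.length - kN + (kN - 1) / 2 < v.length := by rw [hvlen]; omega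
  have hil : (kN - 1) / 2 < v.length := by rw [hvlen]; omega
  have hmem : ∀ x, x ∈ pvGen k values [] ↔
      ∃ c : List Int, c.Sublist values ∧ ((c.length : Int) = k) ∧ x = pvMed k c := by
    intro x
    simpa using pvGen_mem k x values []
  have hub : ∀ x ∈ pvGen k values [],
      v[(kN - 1) / 2]'hil ≤ x ∧ x ≤ v[values.length - kN + (kN - 1) / 2]'hiu := by
    intro x hx
    obtain ⟨c, hcs, hclen, rfl⟩ := (hmem x).mp hx
    have hclenN : c.length = kN := by omega
    rw [pvMed_eq_getElem k c kN hk h1 hclenN]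
    have hb := sublist_getElem_bounds (sorted_sublist_sorted c values hcs) hvp ((kN - 1) / 2)
      (by rw [PySem.List.length_sorted]; omega)
    refine ⟨hb.1, ?_⟩
    have h2b := hb.2
    simp only [PySem.List.length_sorted, hclenN] at h2b
    exact h2b
  have hmax_mem : v[values.length - kN + (kN - 1) / 2]'hiu ∈ pvGen k values [] := by
    rw [hmem]
    obtain ⟨c, hcp, hcs⟩ := ((List.drop_sublist (values.length - kN) v).subperm).trans
      (PySem.List.sorted_perm values (fun y => y) false).subperm
    refine ⟨c, hcs, ?_, ?_⟩
    · have : c.length = kN := by rw [hcp.length_eq, List.length_drop, hvlen]; omega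
      omega
    · exact (pvMed_of_perm_drop values k kN hk h1 h2 c hcp).symm
  have hmin_mem : v[(kN - 1) / 2]'hil ∈ pvGen k values [] := by
    rw [hmem]
    obtain ⟨c, hcp, hcs⟩ := ((List.take_sublist kN v).subperm).trans
      (PySem.List.sorted_perm values (fun y => y) false).subperm
    refine ⟨c, hcs, ?_, ?_⟩
    · have : c.length = kN := by rw [hcp.length_eq, List.length_take, hvlen]; omega
      omega
    · exact (pvMed_of_perm_take values k kN hk h1 h2 c hcp).symm
  have hfd : PySem.Int.floordiv (k - 1) 2 = (((kN - 1) / 2 : Nat) : Int) := by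
    rw [hk, show ((kN : Int) - 1) = ((kN - 1 : Nat) : Int) from by omega]
    exact_mod_cast PySem.Int.floordiv_natCast (kN - 1) 2
  have e1 : PySem.List.pyGetD v ((values.length : Int) - k + PySem.Int.floordiv (k - 1) 2) 0
      = v[values.length - kN + (kN - 1) / 2]'hiu := by
    rw [hfd, show ((values.length : Int) - k + (((kN - 1) / 2 : Nat) : Int))
      = ((values.length - kN + (kN - 1) / 2 : Nat) : Int) from by omega, PySem.List.pyGetD_natCast]
    exact List.getD_eq_getElem _ _ hiu
  have e2 : PySem.List.pyGetD v (PySem.Int.floordiv (k - 1) 2) 0 = v[(kN - 1) / 2]'hil := by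
    rw [hfd, PySem.List.pyGetD_natCast]
    exact List.getD_eq_getElem _ _ hil
  cases hmx : PySem.List.max? (pvGen k values []) (fun y => y) with
  | none =>
    rw [PySem.List.max?_eq_none_iff] at hmx
    rw [hmx] at hmax_mem
    exact absurd hmax_mem (List.not_mem_nil)
  | some mx =>
    cases hmn : PySem.List.min? (pvGen k values []) (fun y => y) with
    | none =>
      rw [PySem.List.min?_eq_none_iff] at hmn
      rw [hmn] at hmin_mem
      exact absurd hmin_mem (List.not_mem_nil)
    | some mn =>
      have hmx1 : mx = v[values.length - kN + (kN - 1) / 2]'hiu :=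
        le_antisymm ((hub mx (PySem.List.max?_mem hmx)).2)
          (by simpa using PySem.List.max?_isMax hmx _ hmax_mem)
      have hmn1 : mn = v[(kN - 1) / 2]'hil :=
        le_antisymm (by simpa using PySem.List.min?_isMin hmn _ hmin_mem)
          ((hub mn (PySem.List.min?_mem hmn)).1)
      show [(PySem.List.max? (pvGen k values []) (fun y => y)).getD 0,
            (PySem.List.min? (pvGen k values []) (fun y => y)).getD 0] = _
      rw [hmx, hmn]
      show [mx, mn] = [PySem.List.pyGetD v ((values.length : Int) - k + PySem.Int.floordiv (k - 1) 2) 0,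
            PySem.List.pyGetD v (PySem.Int.floordiv (k - 1) 2) 0]
      rw [e1, e2, hmx1, hmn1]

-- ===== VERDICT (by name: the statement is the Claim_ definition above) =====
theorem medians_spec : Claim_equal_medians := by
  intro values k _ hpre
  obtain ⟨h1, h2⟩ := hpre
  show medians values k = medians_alt values k
  exact medians_eq values k k.toNat (by omega) (by omega) (by omega)
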